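-- pv_equiv track=rewrite | github.com/mathcelo/adventOfCode | 2025/06/part1.py | solve
-- ===== SOURCE A (Python) =====
-- def math(numbers: list[int], operator: str) -> int:
--     """Perform addition (+) or multiplication (*) on a list of numbers."""
--     if not numbers:
--         return 0
--
--     if operator == "+":
--         return sum(numbers)
--     elif operator == "*":
--         result = 1
--         for num in numbers:
--             result *= num
--         return result
--     else:
--         raise ValueError(f"Unsupported operator: {operator}. Use '+' or '*'")
--
-- def solve(numbers: list[list[int]], operators: list[str]) -> int:
--     """Process each column with its corresponding operator, then sum all results."""
--     results = []
--     num_columns = len(numbers[0]) if numbers else 0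
--
--     for col_idx in range(num_columns):
--         column = [row[col_idx] for row in numbers]
--         operator = operators[col_idx]
--         result = math(column, operator)
--         results.append(result)
--
--     return math(results, "+")
-- ===== SOURCE B (Python) =====
-- def solve(numbers: list[list[int]], operators: list[str]) -> int:
--     """Single row-major streaming pass keeping per-column running aggregates."""
--     if not numbers:
--         return 0
--     n = len(numbers[0])
--     ops = [operators[i] for i in range(n)]
--     for op in ops:
--         if op != "+" and op != "*":
--             raise ValueError(f"Unsupported operator: {op}. Use '+' or '*'")
--     acc = [0 if op == "+" else 1 for op in ops]
--     for row in numbers: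
--         acc = [acc[i] + row[i] if ops[i] == "+" else acc[i] * row[i] for i in range(n)]
--     return sum(acc)
-- ===== Notes on version B (the rewrite author's own statement) =====
-- stated objective: alternative
-- what changed: Replaces A's column-materialization (build each column list, aggregate it with a helper, collect per-column results, sum them) by a single row-major streaming pass that folds every row into a list of per-column running accumulators seeded 0 for '+' and 1 for '*', then sums the accumulators.
import Mathlib
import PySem

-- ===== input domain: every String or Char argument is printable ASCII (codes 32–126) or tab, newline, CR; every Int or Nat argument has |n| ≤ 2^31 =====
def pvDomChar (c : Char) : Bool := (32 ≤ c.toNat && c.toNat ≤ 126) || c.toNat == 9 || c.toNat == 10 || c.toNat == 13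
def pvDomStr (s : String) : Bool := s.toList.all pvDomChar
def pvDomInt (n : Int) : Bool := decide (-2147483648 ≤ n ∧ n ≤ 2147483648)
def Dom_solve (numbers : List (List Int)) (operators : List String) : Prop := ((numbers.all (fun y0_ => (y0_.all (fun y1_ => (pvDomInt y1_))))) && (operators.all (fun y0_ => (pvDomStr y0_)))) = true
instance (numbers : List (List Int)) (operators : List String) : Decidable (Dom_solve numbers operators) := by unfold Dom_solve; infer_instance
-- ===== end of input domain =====

-- B replaces A's column-materialization with one row-major streaming pass over per-column accumulators (alternative decomposition, same cost).

-- ===== PORT A =====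
-- helper `math`: the final `else` branch raises ValueError in Python; Pre_solve excludes those inputs, value 0 is never reached under Pre_.
def mathPy (nums : List Int) (operator : String) : Int :=
  if nums = [] then 0
  else if operator = "+" then nums.sum
  else if operator = "*" then nums.foldl (fun result num => result * num) 1
  else 0

def solve (numbers : List (List Int)) (operators : List String) : Int :=
  let num_columns : Nat := if numbers ≠ [] then (numbers.headD []).length else 0
  let results := (List.range num_columns).foldl
    (fun results (col_idx : Nat) =>
      results ++ [mathPy (numbers.map (fun row => PySem.List.pyGetD row (col_idx : Int) 0))
                    (PySem.List.pyGetD operators (col_idx : Int) "")]) []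
  mathPy results "+"

-- ===== PORT B =====
-- the validation loop over ops only raises ValueError (excluded by Pre_solve); it has no value effect, so it has no Lean counterpart
def solve_alt (numbers : List (List Int)) (operators : List String) : Int :=
  if numbers = [] then 0
  else
    let n := (numbers.headD []).length
    let ops := (List.range n).map (fun (i : Nat) => PySem.List.pyGetD operators (i : Int) "")
    let acc0 := ops.map (fun op => if op = "+" then (0 : Int) else 1)
    let acc := numbers.foldl
      (fun acc row =>
        (List.range n).map (fun (i : Nat) =>
          if PySem.List.pyGetD ops (i : Int) "" = "+"
          then PySem.List.pyGetD acc (i : Int) 0 + PySem.List.pyGetD row (i : Int) 0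
          else PySem.List.pyGetD acc (i : Int) 0 * PySem.List.pyGetD row (i : Int) 0)) acc0
    acc.sum

-- ===== PRECONDITION & SPEC =====
-- Pre_ excludes exactly the inputs where A raises: an operator other than "+"/"*" among the first
-- len(numbers[0]) entries (ValueError), operators shorter than that (IndexError), or a row shorter
-- than the first row (IndexError).
def Pre_solve (numbers : List (List Int)) (operators : List String) : Prop :=
  (numbers.headD []).length ≤ operators.length
  ∧ (∀ op ∈ operators.take (numbers.headD []).length, op = "+" ∨ op = "*")
  ∧ (∀ row ∈ numbers, (numbers.headD []).length ≤ row.length)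
instance (numbers : List (List Int)) (operators : List String) : Decidable (Pre_solve numbers operators) := by unfold Pre_solve; infer_instance
def pvWitness_solve : List (List Int) × List String := ([[1, 2], [3, 4]], ["+", "*"])

def Spec_solve (numbers : List (List Int)) (operators : List String) (out : Int) : Prop := out = solve_alt numbers operators
instance (numbers : List (List Int)) (operators : List String) (out : Int) : Decidable (Spec_solve numbers operators out) := by unfold Spec_solve; infer_instance

-- ===== CLAIM (what is proved, stated in full; the proofs are below) =====
def Claim_equal_solve : Prop := ∀ (numbers : List (List Int)) (operators : List String), Dom_solve numbers operators → Pre_solve numbers operators → Spec_solve numbers operators (solve numbers operators)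

-- ===== LEMMAS AND PROOFS =====

-- per-column fold over the rows, the common form both programs reduce to
def colFold (rows : List (List Int)) (op : String) (i : Nat) (a : Int) : Int :=
  rows.foldl (fun a row => if op = "+" then a + row.getD i 0 else a * row.getD i 0) a

theorem mathPy_plus (l : List Int) : mathPy l "+" = l.sum := by
  cases l <;> simp [mathPy]

theorem getD_map_range' {α : Type} (n i : Nat) (f : Nat → α) (d : α) (hi : i < n) :
    ((List.range n).map f).getD i d = f i := by
  simp [List.getD_eq_getElem?_getD, hi]

-- one streamed row step, on a mapped accumulator
theorem step_map (n : Nat) (ops : List String) (row : List Int) (f : Nat → Int) :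
    (List.range n).map (fun (i : Nat) =>
      if PySem.List.pyGetD ops (i : Int) "" = "+"
      then PySem.List.pyGetD ((List.range n).map f) (i : Int) 0 + PySem.List.pyGetD row (i : Int) 0
      else PySem.List.pyGetD ((List.range n).map f) (i : Int) 0 * PySem.List.pyGetD row (i : Int) 0)
    = (List.range n).map (fun i =>
        if ops.getD i "" = "+" then f i + row.getD i 0 else f i * row.getD i 0) := by
  apply List.map_congr_left
  intro i hi
  simp only [List.mem_range] at hi
  simp [hi]

theorem fold_rows (n : Nat) (ops : List String) (rows : List (List Int)) :
    ∀ f : Nat → Int,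
    rows.foldl
      (fun acc row =>
        (List.range n).map (fun (i : Nat) =>
          if PySem.List.pyGetD ops (i : Int) "" = "+"
          then PySem.List.pyGetD acc (i : Int) 0 + PySem.List.pyGetD row (i : Int) 0
          else PySem.List.pyGetD acc (i : Int) 0 * PySem.List.pyGetD row (i : Int) 0))
      ((List.range n).map f)
    = (List.range n).map (fun i => colFold rows (ops.getD i "") i (f i)) := by
  induction rows with
  | nil => intro f; simp [colFold]
  | cons r rs ih =>
    intro f
    simp only [List.foldl_cons]
    rw [step_map n ops r f, ih]
    apply List.map_congr_left
    intro i _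
    simp [colFold]

theorem solve_eq_sum (numbers : List (List Int)) (operators : List String)
    (hne : numbers ≠ []) :
    solve numbers operators
    = ((List.range (numbers.headD []).length).map
        (fun i => mathPy (numbers.map (fun row => row.getD i 0)) (operators.getD i ""))).sum := by
  unfold solve
  rw [if_pos hne]
  simp only [PySem.List.foldl_append_singleton_eq_map, mathPy_plus]
  congr 1
  apply List.map_congr_left
  intro i hi
  simp

theorem mathPy_col (numbers : List (List Int)) (op : String) (i : Nat)
    (hne : numbers ≠ []) (hop : op = "+" ∨ op = "*") :
    mathPy (numbers.map (fun row => row.getD i 0)) op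
    = colFold numbers op i (if op = "+" then 0 else 1) := by
  have hmapne : numbers.map (fun row => row.getD i 0) ≠ [] := by
    simpa using hne
  rcases hop with h | h <;> subst h
  · rw [mathPy_plus]
    simp only [colFold, reduceIte]
    rw [List.sum_eq_foldl, List.foldl_map]
  · unfold mathPy colFold
    rw [if_neg hmapne]
    simp only [String.reduceEq, reduceIte]
    rw [List.foldl_map]

theorem mem_take_of_getD (operators : List String) (n i : Nat) (hi : i < n)
    (hn : n ≤ operators.length) :
    operators.getD i "" ∈ operators.take n := by
  have hi' : i < (operators.take n).length := by simp; omega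
  have : (operators.take n).getD i "" = operators.getD i "" := by
    simp [List.getD_eq_getElem?_getD, hi]
  rw [← this, List.getD_eq_getElem _ _ hi']
  exact List.getElem_mem _

-- ===== VERDICT (by name: the statement is the Claim_ definition above) =====
theorem solve_spec : Claim_equal_solve := by
  intro numbers operators _ hpre
  obtain ⟨hlen, hval, _⟩ := hpre
  unfold Spec_solve
  by_cases hne : numbers = []
  · subst hne
    simp [solve, solve_alt, mathPy]
  · set n := (numbers.headD []).length with hn
    rw [solve_eq_sum numbers operators hne]
    unfold solve_alt
    rw [if_neg hne]
    simp only [← hn]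
    have hops : ((List.range n).map (fun (i : Nat) => PySem.List.pyGetD operators (i : Int) ""))
        = (List.range n).map (fun i => operators.getD i "") := by
      apply List.map_congr_left; intro i _; simp
    rw [hops, List.map_map]
    rw [fold_rows n ((List.range n).map (fun i => operators.getD i "")) numbers]
    congr 1
    apply List.map_congr_left
    intro i hi
    simp only [List.mem_range] at hi
    rw [getD_map_range' n i _ "" hi]
    exact mathPy_col numbers _ i hne (hval _ (mem_take_of_getD operators n i hi hlen))
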